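-- pv_equiv track=rewrite | github.com/asYUKAN/CamCode | upload/geek.py | find_suggestion
-- ===== SOURCE A (Python) =====
-- def lcs(s1 , s2):
--    m, n = len(s1), len(s2)
--    prev, cur = [0]*(n+1), [0]*(n+1)
--    for i in range(1, m+1):
--        for j in range(1, n+1):
--            if s1[i-1] == s2[j-1]:
--                cur[j] = 1 + prev[j-1]
--            else:
--                if cur[j-1] > prev[j]:
--                    cur[j] = cur[j-1]
--                else:
--                    cur[j] = prev[j]
--        cur, prev = prev, cur
--    return prev[n]
--
-- def find_suggestion(word,res_list):
--     ans=[]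
--     lw=len(word)
--     for i in res_list:
--         d=lcs(word,i)
--         if(d*2>lw):
--             ans.append([d,i])
--     ans.sort(reverse=True)
--     final=[]
--     for j in ans:
--         final.append(j[1])
--     return final
-- ===== SOURCE B (Python) =====
-- def lcs_memo(s1, s2):
--     memo = {}
--     def rec(i, j):
--         if i == 0 or j == 0:
--             return 0
--         key = (i, j)
--         if key in memo:
--             return memo[key]
--         if s1[i - 1] == s2[j - 1]:
--             v = 1 + rec(i - 1, j - 1)
--         else:
--             v = max(rec(i - 1, j), rec(i, j - 1))
--         memo[key] = v
--         return v
--     return rec(len(s1), len(s2))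
--
-- def find_suggestion(word, res_list):
--     lw = len(word)
--     ans = [(d, w) for w in res_list if (d := lcs_memo(word, w)) * 2 > lw]
--     ans.sort(reverse=True)
--     return [w for _, w in ans]
-- ===== Notes on version B (the rewrite author's own statement) =====
-- stated objective: alternative
-- what changed: A's bottom-up rolling two-row LCS tabulation is replaced by top-down memoized recursion on index pairs cached in a dict, and the filter/append wrapper becomes a comprehension with the same sort(reverse=True) tie-breaking.
import Mathlib
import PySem

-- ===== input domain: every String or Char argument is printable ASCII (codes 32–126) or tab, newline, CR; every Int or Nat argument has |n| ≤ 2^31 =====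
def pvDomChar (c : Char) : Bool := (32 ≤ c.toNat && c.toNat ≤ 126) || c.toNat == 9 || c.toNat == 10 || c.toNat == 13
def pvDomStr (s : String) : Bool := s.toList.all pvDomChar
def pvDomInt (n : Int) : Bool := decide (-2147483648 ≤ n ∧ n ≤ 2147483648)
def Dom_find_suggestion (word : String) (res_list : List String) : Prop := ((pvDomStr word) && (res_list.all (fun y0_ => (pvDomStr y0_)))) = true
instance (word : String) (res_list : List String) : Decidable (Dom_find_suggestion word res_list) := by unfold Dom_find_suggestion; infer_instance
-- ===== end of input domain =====

-- B replaces A's bottom-up two-row LCS tabulation by top-down memoized recursion (dict cache);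
-- the filter/sort(reverse=True)/projection wrapper keeps A's exact tie-breaking. Objective: alternative.

-- ===== PORT A =====
-- literal port of lcs: rolling two rows prev/cur, swapped after each row
def lcs (s1 s2 : String) : Int :=
  let l1 := s1.toList
  let l2 := s2.toList
  let m := l1.length
  let n := l2.length
  let st :=
    (PySem.List.pyRange 1 ((m : Int) + 1) 1).foldl
      (fun (st : List Int × List Int) (i : Int) =>
        let prev := st.1
        let cur :=
          (PySem.List.pyRange 1 ((n : Int) + 1) 1).foldl
            (fun (cur : List Int) (j : Int) =>
              if PySem.List.pyGetD l1 (i - 1) ' ' = PySem.List.pyGetD l2 (j - 1) ' ' then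
                PySem.List.pySetD cur j (1 + PySem.List.pyGetD prev (j - 1) 0)
              else
                if PySem.List.pyGetD cur (j - 1) 0 > PySem.List.pyGetD prev j 0 then
                  PySem.List.pySetD cur j (PySem.List.pyGetD cur (j - 1) 0)
                else
                  PySem.List.pySetD cur j (PySem.List.pyGetD prev j 0))
            st.2
        -- cur, prev = prev, cur
        (cur, prev))
      (List.replicate (n + 1) (0 : Int), List.replicate (n + 1) (0 : Int))
  PySem.List.pyGetD st.1 (n : Int) 0

def find_suggestion (word : String) (res_list : List String) : List String :=
  let lw := PySem.Str.len word
  let ans :=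
    res_list.foldl
      (fun (ans : List (Int × String)) (i : String) =>
        let d := lcs word i
        if d * 2 > lw then ans ++ [(d, i)] else ans)
      []
  let ans := PySem.List.sorted2 ans (fun p => p.1) (fun p => p.2) true
  ans.foldl (fun (final : List String) j => final ++ [j.2]) []

-- ===== PORT B =====
-- top-down memoized recursion on (i, j): the value for prefixes s1[:i], s2[:j], cached in a dict
def lcsMemoRec (s1 s2 : List Char) (i j : Nat) (memo : PySem.Dict (Nat × Nat) Int) :
    Int × PySem.Dict (Nat × Nat) Int :=
  if h : i = 0 ∨ j = 0 then (0, memo)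
  else
    if memo.contains (i, j) then (memo.getD (i, j) 0, memo)
    else
      if PySem.List.pyGetD s1 ((i : Int) - 1) ' ' = PySem.List.pyGetD s2 ((j : Int) - 1) ' ' then
        let r := lcsMemoRec s1 s2 (i - 1) (j - 1) memo
        let v := 1 + r.1
        (v, r.2.insert (i, j) v)
      else
        let r1 := lcsMemoRec s1 s2 (i - 1) j memo
        let r2 := lcsMemoRec s1 s2 i (j - 1) r1.2
        let v := max r1.1 r2.1
        (v, r2.2.insert (i, j) v)
  termination_by i + j
  decreasing_by all_goals omega

def lcs_memo (s1 s2 : String) : Int :=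
  (lcsMemoRec s1.toList s2.toList s1.toList.length s2.toList.length PySem.Dict.empty).1

def find_suggestion_alt (word : String) (res_list : List String) : List String :=
  let lw := PySem.Str.len word
  let ans :=
    res_list.filterMap (fun w =>
      let d := lcs_memo word w
      if d * 2 > lw then some (d, w) else none)
  let ans := PySem.List.sorted2 ans (fun p => p.1) (fun p => p.2) true
  ans.map (fun p => p.2)

-- ===== PRECONDITION & SPEC =====
def Spec_find_suggestion (word : String) (res_list : List String) (out : List String) : Prop := out = find_suggestion_alt word res_list
instance (word : String) (res_list : List String) (out : List String) : Decidable (Spec_find_suggestion word res_list out) := by unfold Spec_find_suggestion; infer_instance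

-- ===== CLAIM (what is proved, stated in full; the proofs are below) =====
def Claim_equal_find_suggestion : Prop := ∀ (word : String) (res_list : List String), Dom_find_suggestion word res_list → Spec_find_suggestion word res_list (find_suggestion word res_list)

-- ===== LEMMAS AND PROOFS =====

-- the common recurrence: LCS length of the prefixes l1[:i], l2[:j]
def lcsSpec (l1 l2 : List Char) : Nat → Nat → Int
  | 0, _ => 0
  | _ + 1, 0 => 0
  | i + 1, j + 1 =>
    if l1.getD i ' ' = l2.getD j ' ' then 1 + lcsSpec l1 l2 i j
    else max (lcsSpec l1 l2 i (j + 1)) (lcsSpec l1 l2 (i + 1) j)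
  termination_by i j => i + j

theorem lcsSpec_zero_right (l1 l2 : List Char) (i : Nat) : lcsSpec l1 l2 i 0 = 0 := by
  cases i <;> simp [lcsSpec]

-- every cached value is the spec value
def ValidMemo (l1 l2 : List Char) (memo : PySem.Dict (Nat × Nat) Int) : Prop :=
  ∀ p : Nat × Nat, memo.contains p → memo.getD p 0 = lcsSpec l1 l2 p.1 p.2

theorem lcsSpec_succ (l1 l2 : List Char) (i j : Nat) :
    lcsSpec l1 l2 (i + 1) (j + 1) =
      if l1.getD i ' ' = l2.getD j ' ' then 1 + lcsSpec l1 l2 i j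
      else max (lcsSpec l1 l2 i (j + 1)) (lcsSpec l1 l2 (i + 1) j) := by
  rw [lcsSpec]

theorem ValidMemo_insert (l1 l2 : List Char) (memo : PySem.Dict (Nat × Nat) Int)
    (i j : Nat) (v : Int) (hv : ValidMemo l1 l2 memo) (hval : v = lcsSpec l1 l2 i j) :
    ValidMemo l1 l2 (memo.insert (i, j) v) := by
  intro p hp
  by_cases hpe : p = (i, j)
  · subst hpe; rw [PySem.Dict.getD_insert, if_pos rfl, hval]
  · rw [PySem.Dict.getD_insert, if_neg hpe]
    apply hv
    rw [PySem.Dict.contains_insert] at hp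
    simpa [hpe] using hp

theorem lcsMemoRec_spec (l1 l2 : List Char) :
    ∀ (N i j : Nat) (memo : PySem.Dict (Nat × Nat) Int), i + j < N →
      ValidMemo l1 l2 memo →
      (lcsMemoRec l1 l2 i j memo).1 = lcsSpec l1 l2 i j ∧
        ValidMemo l1 l2 (lcsMemoRec l1 l2 i j memo).2 := by
  intro N
  induction N with
  | zero => intro i j memo h _; omega
  | succ N ih =>
    intro i j memo hlt hv
    rw [lcsMemoRec]
    split
    · rename_i h0
      refine ⟨?_, hv⟩
      rcases h0 with h | h <;> subst h
      · simp [lcsSpec]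
      · rw [lcsSpec_zero_right]
    · rename_i h0
      obtain ⟨i', rfl⟩ : ∃ i', i = i' + 1 := ⟨i - 1, by omega⟩
      obtain ⟨j', rfl⟩ : ∃ j', j = j' + 1 := ⟨j - 1, by omega⟩
      split
      · rename_i hmem
        exact ⟨hv _ hmem, hv⟩
      · rename_i hmem
        have hcast1 : ((i' + 1 : Nat) : Int) - 1 = (i' : Int) := by push_cast; ring
        have hcast2 : ((j' + 1 : Nat) : Int) - 1 = (j' : Int) := by push_cast; ring
        rw [hcast1, hcast2, PySem.List.pyGetD_natCast, PySem.List.pyGetD_natCast]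
        split
        · rename_i hchar
          obtain ⟨h1, hv1⟩ := ih i' j' memo (by omega) hv
          dsimp only
          simp only [Nat.add_sub_cancel]
          constructor
          · rw [lcsSpec_succ, if_pos hchar, h1]
          · exact ValidMemo_insert _ _ _ _ _ _ hv1
              (by rw [lcsSpec_succ, if_pos hchar, h1])
        · rename_i hchar
          obtain ⟨h1, hv1⟩ := ih i' (j' + 1) memo (by omega) hv
          obtain ⟨h2, hv2⟩ := ih (i' + 1) j' _ (by omega) hv1
          dsimp only
          simp only [Nat.add_sub_cancel]
          constructor
          · rw [lcsSpec_succ, if_neg hchar, h1, h2]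
          · exact ValidMemo_insert _ _ _ _ _ _ hv2
              (by rw [lcsSpec_succ, if_neg hchar, h1, h2])

theorem lcs_memo_eq_spec (s1 s2 : String) :
    lcs_memo s1 s2 = lcsSpec s1.toList s2.toList s1.toList.length s2.toList.length := by
  unfold lcs_memo
  exact (lcsMemoRec_spec s1.toList s2.toList
    (s1.toList.length + s2.toList.length + 1) _ _ PySem.Dict.empty (by omega)
    (fun p hp => by simp [PySem.Dict.contains_empty] at hp)).1

theorem getD_set_lt (xs : List Int) (n : Nat) (v : Int) (k : Nat) (h : n < xs.length) :
    (xs.set n v).getD k 0 = if k = n then v else xs.getD k 0 := by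
  simp only [List.getD, List.getElem?_set]
  by_cases hk : k = n
  · simp [hk, h]
  · have hnk : ¬ n = k := fun h' => hk h'.symm
    simp [hk, hnk]

theorem getD_replicate_zero (m k : Nat) : (List.replicate m (0 : Int)).getD k 0 = 0 := by
  simp only [List.getD, List.getElem?_replicate]
  split <;> rfl

-- the inner (column) loop of A: after columns 1..j of row t+1, the prefix 0..j of cur holds row t+1
theorem row_fold (l1 l2 : List Char) (t : Nat) (prev cur : List Int)
    (hc : cur.length = l2.length + 1)
    (hprev : ∀ k, k ≤ l2.length → prev.getD k 0 = lcsSpec l1 l2 t k)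
    (hc0 : cur.getD 0 0 = 0) :
    ∀ j : Nat, j ≤ l2.length →
      (((PySem.List.pyRange 1 ((j : Int) + 1) 1).foldl
          (fun (c : List Int) (jj : Int) =>
            if PySem.List.pyGetD l1 (((t : Int) + 1) - 1) ' ' = PySem.List.pyGetD l2 (jj - 1) ' ' then
              PySem.List.pySetD c jj (1 + PySem.List.pyGetD prev (jj - 1) 0)
            else
              if PySem.List.pyGetD c (jj - 1) 0 > PySem.List.pyGetD prev jj 0 then
                PySem.List.pySetD c jj (PySem.List.pyGetD c (jj - 1) 0)
              else
                PySem.List.pySetD c jj (PySem.List.pyGetD prev jj 0)) cur).length = l2.length + 1) ∧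
      (∀ k, k ≤ j →
        ((PySem.List.pyRange 1 ((j : Int) + 1) 1).foldl
          (fun (c : List Int) (jj : Int) =>
            if PySem.List.pyGetD l1 (((t : Int) + 1) - 1) ' ' = PySem.List.pyGetD l2 (jj - 1) ' ' then
              PySem.List.pySetD c jj (1 + PySem.List.pyGetD prev (jj - 1) 0)
            else
              if PySem.List.pyGetD c (jj - 1) 0 > PySem.List.pyGetD prev jj 0 then
                PySem.List.pySetD c jj (PySem.List.pyGetD c (jj - 1) 0)
              else
                PySem.List.pySetD c jj (PySem.List.pyGetD prev jj 0)) cur).getD k 0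
          = lcsSpec l1 l2 (t + 1) k) := by
  intro j
  induction j with
  | zero =>
    intro _
    have hempty : PySem.List.pyRange 1 (((0 : Nat) : Int) + 1) 1 = [] := by decide
    rw [hempty]
    simp only [List.foldl_nil]
    refine ⟨hc, ?_⟩
    intro k hk
    have hk0 : k = 0 := by omega
    subst hk0
    rw [hc0, lcsSpec_zero_right]
  | succ j ihj =>
    intro hj1
    have hj : j ≤ l2.length := by omega
    obtain ⟨ihlen, ihval⟩ := ihj hj
    have hsplit : PySem.List.pyRange 1 (((j + 1 : Nat) : Int) + 1) 1
        = PySem.List.pyRange 1 (((j : Nat) : Int) + 1) 1 ++ [((j : Nat) : Int) + 1] := by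
      have hcast : ((j + 1 : Nat) : Int) + 1 = (((j : Nat) : Int) + 1) + 1 := by push_cast; ring
      rw [hcast]
      exact PySem.List.pyRange_one_succ_right (by omega)
    rw [hsplit, List.foldl_append, List.foldl_cons, List.foldl_nil]
    set R := (PySem.List.pyRange 1 ((j : Int) + 1) 1).foldl
          (fun (c : List Int) (jj : Int) =>
            if PySem.List.pyGetD l1 (((t : Int) + 1) - 1) ' ' = PySem.List.pyGetD l2 (jj - 1) ' ' then
              PySem.List.pySetD c jj (1 + PySem.List.pyGetD prev (jj - 1) 0)
            else
              if PySem.List.pyGetD c (jj - 1) 0 > PySem.List.pyGetD prev jj 0 then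
                PySem.List.pySetD c jj (PySem.List.pyGetD c (jj - 1) 0)
              else
                PySem.List.pySetD c jj (PySem.List.pyGetD prev jj 0)) cur with hR
    have hidx : ((j : Nat) : Int) + 1 = ((j + 1 : Nat) : Int) := by push_cast; ring
    simp only [add_sub_cancel_right, PySem.List.pyGetD_natCast]
    simp only [hidx, PySem.List.pyGetD_natCast, PySem.List.pySetD_natCast]
    have hpj : prev.getD j 0 = lcsSpec l1 l2 t j := hprev j (by omega)
    have hpj1 : prev.getD (j + 1) 0 = lcsSpec l1 l2 t (j + 1) := hprev (j + 1) (by omega)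
    have hRj : R.getD j 0 = lcsSpec l1 l2 (t + 1) j := ihval j le_rfl
    have hlenR : j + 1 < R.length := by omega
    split_ifs with hchar hgt
    · refine ⟨by simp [ihlen], ?_⟩
      intro k hk
      rw [getD_set_lt _ _ _ _ hlenR]
      by_cases hkj : k = j + 1
      · subst hkj
        rw [if_pos rfl, lcsSpec_succ, if_pos hchar, hpj]
      · rw [if_neg hkj]
        exact ihval k (by omega)
    · refine ⟨by simp [ihlen], ?_⟩
      intro k hk
      rw [getD_set_lt _ _ _ _ hlenR]
      by_cases hkj : k = j + 1
      · subst hkj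
        rw [if_pos rfl, lcsSpec_succ, if_neg hchar, hRj]
        rw [hRj, hpj1] at hgt
        omega
      · rw [if_neg hkj]
        exact ihval k (by omega)
    · refine ⟨by simp [ihlen], ?_⟩
      intro k hk
      rw [getD_set_lt _ _ _ _ hlenR]
      by_cases hkj : k = j + 1
      · subst hkj
        rw [if_pos rfl, lcsSpec_succ, if_neg hchar, hpj1]
        rw [hRj, hpj1] at hgt
        omega
      · rw [if_neg hkj]
        exact ihval k (by omega)

def tableA (l1 l2 : List Char) (t : Nat) : List Int × List Int :=
  (PySem.List.pyRange 1 ((t : Int) + 1) 1).foldl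
    (fun (st : List Int × List Int) (i : Int) =>
      ((PySem.List.pyRange 1 ((l2.length : Int) + 1) 1).foldl
        (fun (c : List Int) (jj : Int) =>
          if PySem.List.pyGetD l1 (i - 1) ' ' = PySem.List.pyGetD l2 (jj - 1) ' ' then
            PySem.List.pySetD c jj (1 + PySem.List.pyGetD st.1 (jj - 1) 0)
          else
            if PySem.List.pyGetD c (jj - 1) 0 > PySem.List.pyGetD st.1 jj 0 then
              PySem.List.pySetD c jj (PySem.List.pyGetD c (jj - 1) 0)
            else
              PySem.List.pySetD c jj (PySem.List.pyGetD st.1 jj 0)) st.2, st.1))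
    (List.replicate (l2.length + 1) (0 : Int), List.replicate (l2.length + 1) (0 : Int))

theorem tableA_spec (l1 l2 : List Char) : ∀ t : Nat,
    (tableA l1 l2 t).1.length = l2.length + 1 ∧
    (tableA l1 l2 t).2.length = l2.length + 1 ∧
    (∀ k, k ≤ l2.length → (tableA l1 l2 t).1.getD k 0 = lcsSpec l1 l2 t k) ∧
    (tableA l1 l2 t).2.getD 0 0 = 0 := by
  intro t
  induction t with
  | zero =>
    have hempty : PySem.List.pyRange 1 (((0 : Nat) : Int) + 1) 1 = [] := by decide
    unfold tableA
    rw [hempty]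
    simp only [List.foldl_nil]
    exact ⟨by simp, by simp, fun k _ => by rw [getD_replicate_zero]; simp [lcsSpec],
      getD_replicate_zero _ _⟩
  | succ t iht =>
    obtain ⟨h1, h2, h3, h4⟩ := iht
    have hsplit : PySem.List.pyRange 1 (((t + 1 : Nat) : Int) + 1) 1
        = PySem.List.pyRange 1 (((t : Nat) : Int) + 1) 1 ++ [((t : Nat) : Int) + 1] := by
      have hcast : ((t + 1 : Nat) : Int) + 1 = (((t : Nat) : Int) + 1) + 1 := by push_cast; ring
      rw [hcast]
      exact PySem.List.pyRange_one_succ_right (by omega)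
    have hstep : tableA l1 l2 (t + 1)
        = ((PySem.List.pyRange 1 ((l2.length : Int) + 1) 1).foldl
            (fun (c : List Int) (jj : Int) =>
              if PySem.List.pyGetD l1 ((((t : Nat) : Int) + 1) - 1) ' ' = PySem.List.pyGetD l2 (jj - 1) ' ' then
                PySem.List.pySetD c jj (1 + PySem.List.pyGetD (tableA l1 l2 t).1 (jj - 1) 0)
              else
                if PySem.List.pyGetD c (jj - 1) 0 > PySem.List.pyGetD (tableA l1 l2 t).1 jj 0 then
                  PySem.List.pySetD c jj (PySem.List.pyGetD c (jj - 1) 0)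
                else
                  PySem.List.pySetD c jj (PySem.List.pyGetD (tableA l1 l2 t).1 jj 0)) (tableA l1 l2 t).2,
           (tableA l1 l2 t).1) := by
      conv_lhs => rw [tableA, hsplit, List.foldl_append, List.foldl_cons, List.foldl_nil]
      rfl
    obtain ⟨rlen, rval⟩ := row_fold l1 l2 t (tableA l1 l2 t).1 (tableA l1 l2 t).2 h2 h3 h4
      l2.length le_rfl
    rw [hstep]
    exact ⟨rlen, h1, fun k hk => rval k hk, by rw [h3 0 (by omega), lcsSpec_zero_right]⟩

theorem lcs_eq_spec (s1 s2 : String) :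
    lcs s1 s2 = lcsSpec s1.toList s2.toList s1.toList.length s2.toList.length := by
  have h := (tableA_spec s1.toList s2.toList s1.toList.length).2.2.1 s2.toList.length le_rfl
  show PySem.List.pyGetD (tableA s1.toList s2.toList s1.toList.length).1 ((s2.toList.length : Nat) : Int) 0
      = lcsSpec s1.toList s2.toList s1.toList.length s2.toList.length
  rw [PySem.List.pyGetD_natCast]
  exact h

theorem lcs_eq_lcs_memo (s1 s2 : String) : lcs s1 s2 = lcs_memo s1 s2 := by
  rw [lcs_eq_spec, lcs_memo_eq_spec]

theorem foldl_if_append_eq_filterMap (word : String) (lw : Int) (xs : List String)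
    (acc : List (Int × String)) (f : String → String → Int) :
    xs.foldl
      (fun (ans : List (Int × String)) (i : String) =>
        let d := f word i
        if d * 2 > lw then ans ++ [(d, i)] else ans) acc
      = acc ++ xs.filterMap (fun w =>
          let d := f word w
          if d * 2 > lw then some (d, w) else none) := by
  induction xs generalizing acc with
  | nil => simp
  | cons x xs ih =>
    simp only [List.foldl_cons, List.filterMap_cons]
    split <;> simp [ih]

-- ===== VERDICT (by name: the statement is the Claim_ definition above) =====
theorem find_suggestion_spec : Claim_equal_find_suggestion := by
  intro word res_list _
  unfold Spec_find_suggestion find_suggestion find_suggestion_alt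
  simp only [foldl_if_append_eq_filterMap, List.nil_append]
  have hf : (fun w => let d := lcs word w; if d * 2 > PySem.Str.len word then some (d, w) else none)
      = (fun w => let d := lcs_memo word w; if d * 2 > PySem.Str.len word then some (d, w) else none) := by
    funext w; simp only [lcs_eq_lcs_memo]
  rw [hf, PySem.List.foldl_append_singleton_eq_map]; rfl
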